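-- pv_equiv track=rewrite | github.com/BellCordeiro/BellCordeiro | CriarNFT 3.py | tagroupa
-- ===== SOURCE A (Python) =====
-- def tagroupa(roupa):
--
--
--     roupa_V =[1, 27, 28, 29, 30, 31, 32, 33, 34, 35, 36, 37, 38]
--     roupa_sem_manga=[2, 39, 40, 41, 42, 43, 44, 45, 46, 47, 48, 49, 50]
--     roupa_sem_manga_2=[3, 51, 52, 53, 54, 55, 56, 57, 58, 59, 60, 61, 62]
--     roupa_maio=[4,63, 64, 65, 66, 67, 68, 69, 70, 71, 72, 73, 74]
--     roupa_capuz=[5, 75, 76, 77, 78, 79, 80, 81, 82, 83, 84, 85, 86]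
--     roupa_suspensorio=[6, 87, 88, 89, 90, 91, 92, 93, 94, 95, 96, 97, 98]
--     roupa_camiseta_padrão=[7, 99, 100, 101, 102, 103, 104, 105, 106, 107, 108, 109, 110]
--     roupa_terno=[8, 9, 10, 11, 12, 13, 14, 15, 16, 17, 18, 19, 111, 112, 113, 114, 115, 116, 117, 118, 119, 120, 121, 122, 123, 124, 125, 126, 127, 128, 129, 130, 131, 132, 133, 134]
--     roupa_camiseta_padrão_2=[20, 135, 136, 137, 138, 139, 140, 141, 142, 143, 144, 145, 146]
--     roupa_gola_alta=[21, 147, 148, 149, 150, 151, 152, 153, 154, 155, 156, 157, 158]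
--     roupa_grega=[22, 159, 160, 161, 162, 163, 164, 165, 166, 167, 168, 169, 170]
--     roupa_gola_alta_v= [23, 171, 172, 173, 174, 175, 176, 177, 178, 179, 180, 181, 182]
--     roupa_capuz_2=[24, 183, 184, 185, 186, 187, 188, 189, 190, 191, 192, 193, 194]
--     roupa_mini_V=[25, 195, 196, 197, 198, 199, 200, 201, 202, 203, 204, 205, 206]
--     roupa_aberta=[26, 207, 208, 209, 210, 211, 212, 213, 214, 215, 216, 217, 218]
--     roupa_florida=[219, 220,223,224]
--     roupa_cozinheiro=[221]
--     roupa_cocos=[222]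
--     if(roupa == '0'):
--         return ('Clothes : none')
--     for ro in roupa_V:
--         if roupa == str(ro):
--             return ('Clothes : V shirt')
--     for ro in roupa_sem_manga:
--         if roupa == str(ro):
--             return ('Clothes : no sleeves')
--     for ro in roupa_sem_manga_2:
--         if roupa == str(ro):
--             return ('Clothes : no sleeves')
--     for ro in  roupa_maio:
--         if roupa == str(ro):
--             return ('Clothes : swimsuit')
--     for ro in roupa_capuz:
--         if roupa == str(ro):
--             return ('Clothes : hoody')
--     for ro in roupa_suspensorio:
--         if roupa == str(ro):
--             return ('Clothes : suspender')
--     for ro in roupa_camiseta_padrão: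
--         if roupa == str(ro):
--             return ('Clothes : T-shirt')
--     for ro in roupa_terno:
--         if roupa == str(ro):
--             return ('Clothes : suit')
--     for ro in roupa_camiseta_padrão_2:
--         if roupa == str(ro):
--             return ('Clothes : T-shirt')
--     for ro in roupa_gola_alta:
--         if roupa == str(ro):
--             return ('Clothes : turtleneck')
--     for ro in roupa_grega:
--         if roupa == str(ro):
--             return ('Clothes : geek')
--     for ro in roupa_gola_alta_v:
--         if roupa == str(ro):
--             return ('Clothes : turtleneck')
--     for ro in roupa_capuz_2:
--         if roupa == str(ro):
--             return ('Clothes : hoody')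
--     for ro in roupa_mini_V:
--         if roupa == str(ro):
--             return ('Clothes : T-shirt')
--     for ro in roupa_aberta:
--         if roupa == str(ro):
--             return ('Clothes : Alien style')
--     for ro in roupa_florida:
--         if roupa == str(ro):
--             return ('Clothes : hawaii clothes')
--     for ro in roupa_cozinheiro:
--         if roupa == str(ro):
--             return ("Clothes : cook's clothes")
--     for ro in roupa_cocos:
--         if roupa == str(ro):
--             return ("Clothes : coconut bikini")
--
--
--     return('Clothes : Não catalogado')
-- ===== SOURCE B (Python) =====
-- # B classifies the id arithmetically: it parses the (at most 3) digits itself and maps the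
-- # number to its label by interval/block arithmetic instead of scanning lists of ids.
--
-- _BLOCK_LABELS = [
--     'Clothes : V shirt',      # block 0: id 1, ids 27-38
--     'Clothes : no sleeves',   # block 1: id 2, ids 39-50
--     'Clothes : no sleeves',   # block 2: id 3, ids 51-62
--     'Clothes : swimsuit',     # block 3: id 4, ids 63-74
--     'Clothes : hoody',        # block 4: id 5, ids 75-86
--     'Clothes : suspender',    # block 5: id 6, ids 87-98
--     'Clothes : T-shirt',      # block 6: id 7, ids 99-110
--     'Clothes : suit',         # block 7: ids 8-19, ids 111-122
--     'Clothes : suit',         # block 8: ids 123-134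
--     'Clothes : T-shirt',      # block 9: id 20, ids 135-146
--     'Clothes : turtleneck',   # block 10: id 21, ids 147-158
--     'Clothes : geek',         # block 11: id 22, ids 159-170
--     'Clothes : turtleneck',   # block 12: id 23, ids 171-182
--     'Clothes : hoody',        # block 13: id 24, ids 183-194
--     'Clothes : T-shirt',      # block 14: id 25, ids 195-206
--     'Clothes : Alien style',  # block 15: id 26, ids 207-218
-- ]
--
-- _DEFAULT = 'Clothes : Não catalogado'
--
--
-- def _label_for(n):
--     if n == 0:
--         return 'Clothes : none'
--     if n <= 7:
--         return _BLOCK_LABELS[n - 1]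
--     if n <= 19:
--         return 'Clothes : suit'
--     if n <= 26:
--         return _BLOCK_LABELS[n - 11]
--     if n <= 218:
--         return _BLOCK_LABELS[(n - 27) // 12]
--     if n == 221:
--         return "Clothes : cook's clothes"
--     if n == 222:
--         return "Clothes : coconut bikini"
--     if n <= 224:
--         return 'Clothes : hawaii clothes'
--     return _DEFAULT
--
--
-- def tagroupa(roupa):
--     if len(roupa) == 0 or len(roupa) > 3:
--         return _DEFAULT
--     n = 0
--     for ch in roupa:
--         if ch < '0' or '9' < ch:
--             return _DEFAULT
--         n = 10 * n + (ord(ch) - 48)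
--     if len(roupa) > 1 and roupa[0] == '0':
--         return _DEFAULT
--     return _label_for(n)
-- ===== Notes on version B (the rewrite author's own statement) =====
-- stated objective: alternative
-- what changed: B checks that the input is the canonical decimal numeral of a number below 1000 by scanning its at most three characters once and computes the label by interval/block arithmetic on that number, instead of comparing the string against eighteen lists of 225 stringified ids.
import Mathlib
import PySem

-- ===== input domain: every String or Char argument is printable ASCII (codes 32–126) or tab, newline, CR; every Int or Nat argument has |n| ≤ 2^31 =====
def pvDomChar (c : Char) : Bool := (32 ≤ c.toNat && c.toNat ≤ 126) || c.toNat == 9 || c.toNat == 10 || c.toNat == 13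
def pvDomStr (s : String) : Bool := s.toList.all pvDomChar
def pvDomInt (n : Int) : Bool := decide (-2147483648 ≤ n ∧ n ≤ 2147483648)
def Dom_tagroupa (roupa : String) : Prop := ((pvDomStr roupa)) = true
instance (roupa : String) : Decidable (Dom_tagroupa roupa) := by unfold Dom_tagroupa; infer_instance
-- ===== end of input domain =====

-- B replaces A's eighteen sequential id-list scans by a single pass over the (at most three)
-- characters that parses the id and classifies the number by interval/block arithmetic (alternative algorithm).

-- ===== PORT A =====
def pvScan (ids : List Int) (label : String) (roupa : String) : Option String :=
  match ids with
  | [] => none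
  | ro :: rest => if roupa == PySem.Int.toStr ro then some label else pvScan rest label roupa

-- literal transliteration of A: the '0' check, then the eighteen sequential scans
def tagroupa (roupa : String) : String :=
  if roupa == "0" then "Clothes : none" else
  (pvScan [1, 27, 28, 29, 30, 31, 32, 33, 34, 35, 36, 37, 38] "Clothes : V shirt" roupa).getD (
  (pvScan [2, 39, 40, 41, 42, 43, 44, 45, 46, 47, 48, 49, 50] "Clothes : no sleeves" roupa).getD (
  (pvScan [3, 51, 52, 53, 54, 55, 56, 57, 58, 59, 60, 61, 62] "Clothes : no sleeves" roupa).getD (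
  (pvScan [4, 63, 64, 65, 66, 67, 68, 69, 70, 71, 72, 73, 74] "Clothes : swimsuit" roupa).getD (
  (pvScan [5, 75, 76, 77, 78, 79, 80, 81, 82, 83, 84, 85, 86] "Clothes : hoody" roupa).getD (
  (pvScan [6, 87, 88, 89, 90, 91, 92, 93, 94, 95, 96, 97, 98] "Clothes : suspender" roupa).getD (
  (pvScan [7, 99, 100, 101, 102, 103, 104, 105, 106, 107, 108, 109, 110] "Clothes : T-shirt" roupa).getD (
  (pvScan [8, 9, 10, 11, 12, 13, 14, 15, 16, 17, 18, 19, 111, 112, 113, 114, 115, 116, 117, 118, 119, 120, 121, 122, 123, 124, 125, 126, 127, 128, 129, 130, 131, 132, 133, 134] "Clothes : suit" roupa).getD (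
  (pvScan [20, 135, 136, 137, 138, 139, 140, 141, 142, 143, 144, 145, 146] "Clothes : T-shirt" roupa).getD (
  (pvScan [21, 147, 148, 149, 150, 151, 152, 153, 154, 155, 156, 157, 158] "Clothes : turtleneck" roupa).getD (
  (pvScan [22, 159, 160, 161, 162, 163, 164, 165, 166, 167, 168, 169, 170] "Clothes : geek" roupa).getD (
  (pvScan [23, 171, 172, 173, 174, 175, 176, 177, 178, 179, 180, 181, 182] "Clothes : turtleneck" roupa).getD (
  (pvScan [24, 183, 184, 185, 186, 187, 188, 189, 190, 191, 192, 193, 194] "Clothes : hoody" roupa).getD (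
  (pvScan [25, 195, 196, 197, 198, 199, 200, 201, 202, 203, 204, 205, 206] "Clothes : T-shirt" roupa).getD (
  (pvScan [26, 207, 208, 209, 210, 211, 212, 213, 214, 215, 216, 217, 218] "Clothes : Alien style" roupa).getD (
  (pvScan [219, 220, 223, 224] "Clothes : hawaii clothes" roupa).getD (
  (pvScan [221] "Clothes : cook's clothes" roupa).getD (
  (pvScan [222] "Clothes : coconut bikini" roupa).getD (
  "Clothes : Não catalogado"))))))))))))))))))

-- ===== PORT B =====
-- _BLOCK_LABELS: one label per 12-wide block of ids starting at 27 (suit spans two blocks)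
def pvBlockLabels : List String :=
  ["Clothes : V shirt", "Clothes : no sleeves", "Clothes : no sleeves", "Clothes : swimsuit",
   "Clothes : hoody", "Clothes : suspender", "Clothes : T-shirt", "Clothes : suit",
   "Clothes : suit", "Clothes : T-shirt", "Clothes : turtleneck", "Clothes : geek",
   "Clothes : turtleneck", "Clothes : hoody", "Clothes : T-shirt", "Clothes : Alien style"]

def pvDefault : String := "Clothes : Não catalogado"

-- _label_for(n): the interval/block arithmetic (indices are in range on every branch taken)
def pvClassify (n : Int) : String :=
  if n = 0 then "Clothes : none"
  else if n ≤ 7 then (PySem.List.pyGet? pvBlockLabels (n - 1)).getD ""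
  else if n ≤ 19 then "Clothes : suit"
  else if n ≤ 26 then (PySem.List.pyGet? pvBlockLabels (n - 11)).getD ""
  else if n ≤ 218 then (PySem.List.pyGet? pvBlockLabels (PySem.Int.floordiv (n - 27) 12)).getD ""
  else if n = 221 then "Clothes : cook's clothes"
  else if n = 222 then "Clothes : coconut bikini"
  else if n ≤ 224 then "Clothes : hawaii clothes"
  else pvDefault

-- the for-loop over the characters: early return None on a non-digit, else accumulate the value
def pvParse : List Char → Int → Option Int
  | [], n => some n
  | c :: rest, n => if c < '0' ∨ '9' < c then none else pvParse rest (10 * n + ((c.toNat : Int) - 48))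

-- transliteration of B: length guard, digit loop, leading-zero guard, then _label_for
def tagroupa_alt (roupa : String) : String :=
  if PySem.Str.len roupa = 0 ∨ 3 < PySem.Str.len roupa then pvDefault else
  match pvParse roupa.toList 0 with
  | none => pvDefault
  | some n =>
    if 1 < PySem.Str.len roupa ∧ PySem.Str.pyGet? roupa 0 == some '0' then pvDefault
    else pvClassify n

-- ===== PRECONDITION & SPEC =====
def Spec_tagroupa (roupa : String) (out : String) : Prop := out = tagroupa_alt roupa
instance (roupa : String) (out : String) : Decidable (Spec_tagroupa roupa out) := by unfold Spec_tagroupa; infer_instance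

-- ===== CLAIM (what is proved, stated in full; the proofs are below) =====
def Claim_equal_tagroupa : Prop := ∀ (roupa : String), Dom_tagroupa roupa → Spec_tagroupa roupa (tagroupa roupa)

-- ===== LEMMAS AND PROOFS =====
-- first-match lookup in an association list (proof-side notion A's scan chain reduces to)
def pvLookup : List (String × String) → String → Option String
  | [], _ => none
  | (k, v) :: rest, r => if k == r then some v else pvLookup rest r

-- the same lookup with integer keys
def pvNlookup : List (Int × String) → Int → Option String
  | [], _ => none
  | (k, v) :: rest, n => if k == n then some v else pvNlookup rest n

-- value of a digit string (B's accumulator, as a function)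
def pvVal : List Char → Int → Int
  | [], n => n
  | c :: rest, n => pvVal rest (10 * n + ((c.toNat : Int) - 48))

-- canonical decimal numeral of a number 0..999: nonempty, ≤ 3 digits, no leading zero
def pvCanonL (cs : List Char) : Bool :=
  !cs.isEmpty && cs.length ≤ 3 && cs.all (fun c => !(decide (c < '0') || decide ('9' < c))) &&
    !(decide (1 < cs.length) && (cs.headD ' ' == '0'))

-- the catalogue's contents, in A's scan order
def pvL : List (String × String) :=
  ("0", "Clothes : none") ::
  ([1, 27, 28, 29, 30, 31, 32, 33, 34, 35, 36, 37, 38]).map (fun i => (PySem.Int.toStr i, "Clothes : V shirt")) ++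
  ([2, 39, 40, 41, 42, 43, 44, 45, 46, 47, 48, 49, 50]).map (fun i => (PySem.Int.toStr i, "Clothes : no sleeves")) ++
  ([3, 51, 52, 53, 54, 55, 56, 57, 58, 59, 60, 61, 62]).map (fun i => (PySem.Int.toStr i, "Clothes : no sleeves")) ++
  ([4, 63, 64, 65, 66, 67, 68, 69, 70, 71, 72, 73, 74]).map (fun i => (PySem.Int.toStr i, "Clothes : swimsuit")) ++
  ([5, 75, 76, 77, 78, 79, 80, 81, 82, 83, 84, 85, 86]).map (fun i => (PySem.Int.toStr i, "Clothes : hoody")) ++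
  ([6, 87, 88, 89, 90, 91, 92, 93, 94, 95, 96, 97, 98]).map (fun i => (PySem.Int.toStr i, "Clothes : suspender")) ++
  ([7, 99, 100, 101, 102, 103, 104, 105, 106, 107, 108, 109, 110]).map (fun i => (PySem.Int.toStr i, "Clothes : T-shirt")) ++
  ([8, 9, 10, 11, 12, 13, 14, 15, 16, 17, 18, 19, 111, 112, 113, 114, 115, 116, 117, 118, 119, 120, 121, 122, 123, 124, 125, 126, 127, 128, 129, 130, 131, 132, 133, 134]).map (fun i => (PySem.Int.toStr i, "Clothes : suit")) ++
  ([20, 135, 136, 137, 138, 139, 140, 141, 142, 143, 144, 145, 146]).map (fun i => (PySem.Int.toStr i, "Clothes : T-shirt")) ++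
  ([21, 147, 148, 149, 150, 151, 152, 153, 154, 155, 156, 157, 158]).map (fun i => (PySem.Int.toStr i, "Clothes : turtleneck")) ++
  ([22, 159, 160, 161, 162, 163, 164, 165, 166, 167, 168, 169, 170]).map (fun i => (PySem.Int.toStr i, "Clothes : geek")) ++
  ([23, 171, 172, 173, 174, 175, 176, 177, 178, 179, 180, 181, 182]).map (fun i => (PySem.Int.toStr i, "Clothes : turtleneck")) ++
  ([24, 183, 184, 185, 186, 187, 188, 189, 190, 191, 192, 193, 194]).map (fun i => (PySem.Int.toStr i, "Clothes : hoody")) ++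
  ([25, 195, 196, 197, 198, 199, 200, 201, 202, 203, 204, 205, 206]).map (fun i => (PySem.Int.toStr i, "Clothes : T-shirt")) ++
  ([26, 207, 208, 209, 210, 211, 212, 213, 214, 215, 216, 217, 218]).map (fun i => (PySem.Int.toStr i, "Clothes : Alien style")) ++
  ([219, 220, 223, 224]).map (fun i => (PySem.Int.toStr i, "Clothes : hawaii clothes")) ++
  ([221]).map (fun i => (PySem.Int.toStr i, "Clothes : cook\'s clothes")) ++
  ([222]).map (fun i => (PySem.Int.toStr i, "Clothes : coconut bikini"))

def pvLc : List (String × String) := [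
  ("0", "Clothes : none"),
  ("1", "Clothes : V shirt"),
  ("27", "Clothes : V shirt"),
  ("28", "Clothes : V shirt"),
  ("29", "Clothes : V shirt"),
  ("30", "Clothes : V shirt"),
  ("31", "Clothes : V shirt"),
  ("32", "Clothes : V shirt"),
  ("33", "Clothes : V shirt"),
  ("34", "Clothes : V shirt"),
  ("35", "Clothes : V shirt"),
  ("36", "Clothes : V shirt"),
  ("37", "Clothes : V shirt"),
  ("38", "Clothes : V shirt"),
  ("2", "Clothes : no sleeves"),
  ("39", "Clothes : no sleeves"),
  ("40", "Clothes : no sleeves"),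
  ("41", "Clothes : no sleeves"),
  ("42", "Clothes : no sleeves"),
  ("43", "Clothes : no sleeves"),
  ("44", "Clothes : no sleeves"),
  ("45", "Clothes : no sleeves"),
  ("46", "Clothes : no sleeves"),
  ("47", "Clothes : no sleeves"),
  ("48", "Clothes : no sleeves"),
  ("49", "Clothes : no sleeves"),
  ("50", "Clothes : no sleeves"),
  ("3", "Clothes : no sleeves"),
  ("51", "Clothes : no sleeves"),
  ("52", "Clothes : no sleeves"),
  ("53", "Clothes : no sleeves"),
  ("54", "Clothes : no sleeves"),
  ("55", "Clothes : no sleeves"),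
  ("56", "Clothes : no sleeves"),
  ("57", "Clothes : no sleeves"),
  ("58", "Clothes : no sleeves"),
  ("59", "Clothes : no sleeves"),
  ("60", "Clothes : no sleeves"),
  ("61", "Clothes : no sleeves"),
  ("62", "Clothes : no sleeves"),
  ("4", "Clothes : swimsuit"),
  ("63", "Clothes : swimsuit"),
  ("64", "Clothes : swimsuit"),
  ("65", "Clothes : swimsuit"),
  ("66", "Clothes : swimsuit"),
  ("67", "Clothes : swimsuit"),
  ("68", "Clothes : swimsuit"),
  ("69", "Clothes : swimsuit"),
  ("70", "Clothes : swimsuit"),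
  ("71", "Clothes : swimsuit"),
  ("72", "Clothes : swimsuit"),
  ("73", "Clothes : swimsuit"),
  ("74", "Clothes : swimsuit"),
  ("5", "Clothes : hoody"),
  ("75", "Clothes : hoody"),
  ("76", "Clothes : hoody"),
  ("77", "Clothes : hoody"),
  ("78", "Clothes : hoody"),
  ("79", "Clothes : hoody"),
  ("80", "Clothes : hoody"),
  ("81", "Clothes : hoody"),
  ("82", "Clothes : hoody"),
  ("83", "Clothes : hoody"),
  ("84", "Clothes : hoody"),
  ("85", "Clothes : hoody"),
  ("86", "Clothes : hoody"),
  ("6", "Clothes : suspender"),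
  ("87", "Clothes : suspender"),
  ("88", "Clothes : suspender"),
  ("89", "Clothes : suspender"),
  ("90", "Clothes : suspender"),
  ("91", "Clothes : suspender"),
  ("92", "Clothes : suspender"),
  ("93", "Clothes : suspender"),
  ("94", "Clothes : suspender"),
  ("95", "Clothes : suspender"),
  ("96", "Clothes : suspender"),
  ("97", "Clothes : suspender"),
  ("98", "Clothes : suspender"),
  ("7", "Clothes : T-shirt"),
  ("99", "Clothes : T-shirt"),
  ("100", "Clothes : T-shirt"),
  ("101", "Clothes : T-shirt"),
  ("102", "Clothes : T-shirt"),
  ("103", "Clothes : T-shirt"),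
  ("104", "Clothes : T-shirt"),
  ("105", "Clothes : T-shirt"),
  ("106", "Clothes : T-shirt"),
  ("107", "Clothes : T-shirt"),
  ("108", "Clothes : T-shirt"),
  ("109", "Clothes : T-shirt"),
  ("110", "Clothes : T-shirt"),
  ("8", "Clothes : suit"),
  ("9", "Clothes : suit"),
  ("10", "Clothes : suit"),
  ("11", "Clothes : suit"),
  ("12", "Clothes : suit"),
  ("13", "Clothes : suit"),
  ("14", "Clothes : suit"),
  ("15", "Clothes : suit"),
  ("16", "Clothes : suit"),
  ("17", "Clothes : suit"),
  ("18", "Clothes : suit"),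
  ("19", "Clothes : suit"),
  ("111", "Clothes : suit"),
  ("112", "Clothes : suit"),
  ("113", "Clothes : suit"),
  ("114", "Clothes : suit"),
  ("115", "Clothes : suit"),
  ("116", "Clothes : suit"),
  ("117", "Clothes : suit"),
  ("118", "Clothes : suit"),
  ("119", "Clothes : suit"),
  ("120", "Clothes : suit"),
  ("121", "Clothes : suit"),
  ("122", "Clothes : suit"),
  ("123", "Clothes : suit"),
  ("124", "Clothes : suit"),
  ("125", "Clothes : suit"),
  ("126", "Clothes : suit"),
  ("127", "Clothes : suit"),
  ("128", "Clothes : suit"),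
  ("129", "Clothes : suit"),
  ("130", "Clothes : suit"),
  ("131", "Clothes : suit"),
  ("132", "Clothes : suit"),
  ("133", "Clothes : suit"),
  ("134", "Clothes : suit"),
  ("20", "Clothes : T-shirt"),
  ("135", "Clothes : T-shirt"),
  ("136", "Clothes : T-shirt"),
  ("137", "Clothes : T-shirt"),
  ("138", "Clothes : T-shirt"),
  ("139", "Clothes : T-shirt"),
  ("140", "Clothes : T-shirt"),
  ("141", "Clothes : T-shirt"),
  ("142", "Clothes : T-shirt"),
  ("143", "Clothes : T-shirt"),
  ("144", "Clothes : T-shirt"),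
  ("145", "Clothes : T-shirt"),
  ("146", "Clothes : T-shirt"),
  ("21", "Clothes : turtleneck"),
  ("147", "Clothes : turtleneck"),
  ("148", "Clothes : turtleneck"),
  ("149", "Clothes : turtleneck"),
  ("150", "Clothes : turtleneck"),
  ("151", "Clothes : turtleneck"),
  ("152", "Clothes : turtleneck"),
  ("153", "Clothes : turtleneck"),
  ("154", "Clothes : turtleneck"),
  ("155", "Clothes : turtleneck"),
  ("156", "Clothes : turtleneck"),
  ("157", "Clothes : turtleneck"),
  ("158", "Clothes : turtleneck"),
  ("22", "Clothes : geek"),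
  ("159", "Clothes : geek"),
  ("160", "Clothes : geek"),
  ("161", "Clothes : geek"),
  ("162", "Clothes : geek"),
  ("163", "Clothes : geek"),
  ("164", "Clothes : geek"),
  ("165", "Clothes : geek"),
  ("166", "Clothes : geek"),
  ("167", "Clothes : geek"),
  ("168", "Clothes : geek"),
  ("169", "Clothes : geek"),
  ("170", "Clothes : geek"),
  ("23", "Clothes : turtleneck"),
  ("171", "Clothes : turtleneck"),
  ("172", "Clothes : turtleneck"),
  ("173", "Clothes : turtleneck"),
  ("174", "Clothes : turtleneck"),
  ("175", "Clothes : turtleneck"),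
  ("176", "Clothes : turtleneck"),
  ("177", "Clothes : turtleneck"),
  ("178", "Clothes : turtleneck"),
  ("179", "Clothes : turtleneck"),
  ("180", "Clothes : turtleneck"),
  ("181", "Clothes : turtleneck"),
  ("182", "Clothes : turtleneck"),
  ("24", "Clothes : hoody"),
  ("183", "Clothes : hoody"),
  ("184", "Clothes : hoody"),
  ("185", "Clothes : hoody"),
  ("186", "Clothes : hoody"),
  ("187", "Clothes : hoody"),
  ("188", "Clothes : hoody"),
  ("189", "Clothes : hoody"),
  ("190", "Clothes : hoody"),
  ("191", "Clothes : hoody"),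
  ("192", "Clothes : hoody"),
  ("193", "Clothes : hoody"),
  ("194", "Clothes : hoody"),
  ("25", "Clothes : T-shirt"),
  ("195", "Clothes : T-shirt"),
  ("196", "Clothes : T-shirt"),
  ("197", "Clothes : T-shirt"),
  ("198", "Clothes : T-shirt"),
  ("199", "Clothes : T-shirt"),
  ("200", "Clothes : T-shirt"),
  ("201", "Clothes : T-shirt"),
  ("202", "Clothes : T-shirt"),
  ("203", "Clothes : T-shirt"),
  ("204", "Clothes : T-shirt"),
  ("205", "Clothes : T-shirt"),
  ("206", "Clothes : T-shirt"),
  ("26", "Clothes : Alien style"),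
  ("207", "Clothes : Alien style"),
  ("208", "Clothes : Alien style"),
  ("209", "Clothes : Alien style"),
  ("210", "Clothes : Alien style"),
  ("211", "Clothes : Alien style"),
  ("212", "Clothes : Alien style"),
  ("213", "Clothes : Alien style"),
  ("214", "Clothes : Alien style"),
  ("215", "Clothes : Alien style"),
  ("216", "Clothes : Alien style"),
  ("217", "Clothes : Alien style"),
  ("218", "Clothes : Alien style"),
  ("219", "Clothes : hawaii clothes"),
  ("220", "Clothes : hawaii clothes"),
  ("223", "Clothes : hawaii clothes"),
  ("224", "Clothes : hawaii clothes"),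
  ("221", "Clothes : cook\'s clothes"),
  ("222", "Clothes : coconut bikini")
]

def pvN : List (Int × String) := [
  (0, "Clothes : none"),
  (1, "Clothes : V shirt"),
  (27, "Clothes : V shirt"),
  (28, "Clothes : V shirt"),
  (29, "Clothes : V shirt"),
  (30, "Clothes : V shirt"),
  (31, "Clothes : V shirt"),
  (32, "Clothes : V shirt"),
  (33, "Clothes : V shirt"),
  (34, "Clothes : V shirt"),
  (35, "Clothes : V shirt"),
  (36, "Clothes : V shirt"),
  (37, "Clothes : V shirt"),
  (38, "Clothes : V shirt"),
  (2, "Clothes : no sleeves"),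
  (39, "Clothes : no sleeves"),
  (40, "Clothes : no sleeves"),
  (41, "Clothes : no sleeves"),
  (42, "Clothes : no sleeves"),
  (43, "Clothes : no sleeves"),
  (44, "Clothes : no sleeves"),
  (45, "Clothes : no sleeves"),
  (46, "Clothes : no sleeves"),
  (47, "Clothes : no sleeves"),
  (48, "Clothes : no sleeves"),
  (49, "Clothes : no sleeves"),
  (50, "Clothes : no sleeves"),
  (3, "Clothes : no sleeves"),
  (51, "Clothes : no sleeves"),
  (52, "Clothes : no sleeves"),
  (53, "Clothes : no sleeves"),
  (54, "Clothes : no sleeves"),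
  (55, "Clothes : no sleeves"),
  (56, "Clothes : no sleeves"),
  (57, "Clothes : no sleeves"),
  (58, "Clothes : no sleeves"),
  (59, "Clothes : no sleeves"),
  (60, "Clothes : no sleeves"),
  (61, "Clothes : no sleeves"),
  (62, "Clothes : no sleeves"),
  (4, "Clothes : swimsuit"),
  (63, "Clothes : swimsuit"),
  (64, "Clothes : swimsuit"),
  (65, "Clothes : swimsuit"),
  (66, "Clothes : swimsuit"),
  (67, "Clothes : swimsuit"),
  (68, "Clothes : swimsuit"),
  (69, "Clothes : swimsuit"),
  (70, "Clothes : swimsuit"),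
  (71, "Clothes : swimsuit"),
  (72, "Clothes : swimsuit"),
  (73, "Clothes : swimsuit"),
  (74, "Clothes : swimsuit"),
  (5, "Clothes : hoody"),
  (75, "Clothes : hoody"),
  (76, "Clothes : hoody"),
  (77, "Clothes : hoody"),
  (78, "Clothes : hoody"),
  (79, "Clothes : hoody"),
  (80, "Clothes : hoody"),
  (81, "Clothes : hoody"),
  (82, "Clothes : hoody"),
  (83, "Clothes : hoody"),
  (84, "Clothes : hoody"),
  (85, "Clothes : hoody"),
  (86, "Clothes : hoody"),
  (6, "Clothes : suspender"),
  (87, "Clothes : suspender"),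
  (88, "Clothes : suspender"),
  (89, "Clothes : suspender"),
  (90, "Clothes : suspender"),
  (91, "Clothes : suspender"),
  (92, "Clothes : suspender"),
  (93, "Clothes : suspender"),
  (94, "Clothes : suspender"),
  (95, "Clothes : suspender"),
  (96, "Clothes : suspender"),
  (97, "Clothes : suspender"),
  (98, "Clothes : suspender"),
  (7, "Clothes : T-shirt"),
  (99, "Clothes : T-shirt"),
  (100, "Clothes : T-shirt"),
  (101, "Clothes : T-shirt"),
  (102, "Clothes : T-shirt"),
  (103, "Clothes : T-shirt"),
  (104, "Clothes : T-shirt"),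
  (105, "Clothes : T-shirt"),
  (106, "Clothes : T-shirt"),
  (107, "Clothes : T-shirt"),
  (108, "Clothes : T-shirt"),
  (109, "Clothes : T-shirt"),
  (110, "Clothes : T-shirt"),
  (8, "Clothes : suit"),
  (9, "Clothes : suit"),
  (10, "Clothes : suit"),
  (11, "Clothes : suit"),
  (12, "Clothes : suit"),
  (13, "Clothes : suit"),
  (14, "Clothes : suit"),
  (15, "Clothes : suit"),
  (16, "Clothes : suit"),
  (17, "Clothes : suit"),
  (18, "Clothes : suit"),
  (19, "Clothes : suit"),
  (111, "Clothes : suit"),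
  (112, "Clothes : suit"),
  (113, "Clothes : suit"),
  (114, "Clothes : suit"),
  (115, "Clothes : suit"),
  (116, "Clothes : suit"),
  (117, "Clothes : suit"),
  (118, "Clothes : suit"),
  (119, "Clothes : suit"),
  (120, "Clothes : suit"),
  (121, "Clothes : suit"),
  (122, "Clothes : suit"),
  (123, "Clothes : suit"),
  (124, "Clothes : suit"),
  (125, "Clothes : suit"),
  (126, "Clothes : suit"),
  (127, "Clothes : suit"),
  (128, "Clothes : suit"),
  (129, "Clothes : suit"),
  (130, "Clothes : suit"),
  (131, "Clothes : suit"),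
  (132, "Clothes : suit"),
  (133, "Clothes : suit"),
  (134, "Clothes : suit"),
  (20, "Clothes : T-shirt"),
  (135, "Clothes : T-shirt"),
  (136, "Clothes : T-shirt"),
  (137, "Clothes : T-shirt"),
  (138, "Clothes : T-shirt"),
  (139, "Clothes : T-shirt"),
  (140, "Clothes : T-shirt"),
  (141, "Clothes : T-shirt"),
  (142, "Clothes : T-shirt"),
  (143, "Clothes : T-shirt"),
  (144, "Clothes : T-shirt"),
  (145, "Clothes : T-shirt"),
  (146, "Clothes : T-shirt"),
  (21, "Clothes : turtleneck"),
  (147, "Clothes : turtleneck"),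
  (148, "Clothes : turtleneck"),
  (149, "Clothes : turtleneck"),
  (150, "Clothes : turtleneck"),
  (151, "Clothes : turtleneck"),
  (152, "Clothes : turtleneck"),
  (153, "Clothes : turtleneck"),
  (154, "Clothes : turtleneck"),
  (155, "Clothes : turtleneck"),
  (156, "Clothes : turtleneck"),
  (157, "Clothes : turtleneck"),
  (158, "Clothes : turtleneck"),
  (22, "Clothes : geek"),
  (159, "Clothes : geek"),
  (160, "Clothes : geek"),
  (161, "Clothes : geek"),
  (162, "Clothes : geek"),
  (163, "Clothes : geek"),
  (164, "Clothes : geek"),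
  (165, "Clothes : geek"),
  (166, "Clothes : geek"),
  (167, "Clothes : geek"),
  (168, "Clothes : geek"),
  (169, "Clothes : geek"),
  (170, "Clothes : geek"),
  (23, "Clothes : turtleneck"),
  (171, "Clothes : turtleneck"),
  (172, "Clothes : turtleneck"),
  (173, "Clothes : turtleneck"),
  (174, "Clothes : turtleneck"),
  (175, "Clothes : turtleneck"),
  (176, "Clothes : turtleneck"),
  (177, "Clothes : turtleneck"),
  (178, "Clothes : turtleneck"),
  (179, "Clothes : turtleneck"),
  (180, "Clothes : turtleneck"),
  (181, "Clothes : turtleneck"),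
  (182, "Clothes : turtleneck"),
  (24, "Clothes : hoody"),
  (183, "Clothes : hoody"),
  (184, "Clothes : hoody"),
  (185, "Clothes : hoody"),
  (186, "Clothes : hoody"),
  (187, "Clothes : hoody"),
  (188, "Clothes : hoody"),
  (189, "Clothes : hoody"),
  (190, "Clothes : hoody"),
  (191, "Clothes : hoody"),
  (192, "Clothes : hoody"),
  (193, "Clothes : hoody"),
  (194, "Clothes : hoody"),
  (25, "Clothes : T-shirt"),
  (195, "Clothes : T-shirt"),
  (196, "Clothes : T-shirt"),
  (197, "Clothes : T-shirt"),
  (198, "Clothes : T-shirt"),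
  (199, "Clothes : T-shirt"),
  (200, "Clothes : T-shirt"),
  (201, "Clothes : T-shirt"),
  (202, "Clothes : T-shirt"),
  (203, "Clothes : T-shirt"),
  (204, "Clothes : T-shirt"),
  (205, "Clothes : T-shirt"),
  (206, "Clothes : T-shirt"),
  (26, "Clothes : Alien style"),
  (207, "Clothes : Alien style"),
  (208, "Clothes : Alien style"),
  (209, "Clothes : Alien style"),
  (210, "Clothes : Alien style"),
  (211, "Clothes : Alien style"),
  (212, "Clothes : Alien style"),
  (213, "Clothes : Alien style"),
  (214, "Clothes : Alien style"),
  (215, "Clothes : Alien style"),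
  (216, "Clothes : Alien style"),
  (217, "Clothes : Alien style"),
  (218, "Clothes : Alien style"),
  (219, "Clothes : hawaii clothes"),
  (220, "Clothes : hawaii clothes"),
  (223, "Clothes : hawaii clothes"),
  (224, "Clothes : hawaii clothes"),
  (221, "Clothes : cook\'s clothes"),
  (222, "Clothes : coconut bikini")
]

theorem pvLookup_nil (r : String) : pvLookup [] r = none := rfl

theorem pvLookup_cons (k v : String) (rest : List (String × String)) (r : String) :
    pvLookup ((k, v) :: rest) r = if k == r then some v else pvLookup rest r := rfl

theorem pvLookup_append (xs ys : List (String × String)) (r : String) :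
    pvLookup (xs ++ ys) r = ((pvLookup xs r).or (pvLookup ys r)) := by
  induction xs with
  | nil => simp [pvLookup_nil]
  | cons p rest ih =>
    obtain ⟨k, v⟩ := p
    by_cases h : k == r <;> simp [pvLookup_cons, h, ih, Option.or]

theorem pvScan_eq_lookup (ids : List Int) (lbl r : String) :
    pvScan ids lbl r = pvLookup (ids.map (fun i => (PySem.Int.toStr i, lbl))) r := by
  induction ids with
  | nil => simp [pvScan, pvLookup_nil]
  | cons i rest ih =>
    by_cases h : r = PySem.Int.toStr i
    · simp [pvScan, pvLookup_cons, h]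
    · simp [pvScan, pvLookup_cons, h, Ne.symm h, ih]

theorem pvOr_getD (a b : Option String) (d : String) :
    (a.or b).getD d = a.getD (b.getD d) := by
  cases a <;> rfl

theorem pvA_eq (r : String) :
    tagroupa r = (pvLookup pvL r).getD "Clothes : Não catalogado" := by
  by_cases h0 : r = "0"
  · subst h0; rfl
  · have h1 : ¬((r == "0") = true) := by simp [h0]
    have h2 : ¬(("0" == r) = true) := by simp [Ne.symm h0]
    unfold tagroupa pvL
    rw [if_neg h1]
    simp only [pvLookup_append, pvOr_getD, pvLookup_cons]
    rw [if_neg h2]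
    simp only [pvScan_eq_lookup]

set_option maxRecDepth 40000 in
theorem pvL_eq : pvL = pvLc := by decide

-- every key of the catalogue is a canonical numeral
set_option maxRecDepth 40000 in
theorem pvKeysCanon : pvLc.all (fun p => pvCanonL p.1.toList) = true := by decide

-- the catalogue keyed by value
set_option maxRecDepth 40000 in
theorem pvMap_eq : pvLc.map (fun p => (pvVal p.1.toList 0, p.2)) = pvN := by decide

-- every id is at most 224
set_option maxRecDepth 40000 in
theorem pvN_small : pvN.all (fun p => decide (p.1 ≤ 224)) = true := by decide

-- chars with 48 ≤ toNat ≤ 57 are exactly the digits; digit facts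
theorem pvCharEq (c d : Char) (h : c.toNat = d.toNat) : c = d := by
  rw [← Char.ofNat_toNat c, ← Char.ofNat_toNat d, h]

theorem pvDigit_bounds (c : Char) (h : (!(decide (c < '0') || decide ('9' < c))) = true) :
    48 ≤ c.toNat ∧ c.toNat ≤ 57 := by
  simp only [Bool.not_eq_eq_eq_not, Bool.not_true, Bool.or_eq_false_iff,
    decide_eq_false_iff_not, not_lt] at h
  obtain ⟨h1, h2⟩ := h
  rw [Char.le_def] at h1 h2
  constructor
  · exact_mod_cast h1
  · exact_mod_cast h2

theorem pvNotLead (cs : List Char)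
    (h : (!(decide (1 < cs.length) && (cs.headD ' ' == '0'))) = true) :
    ¬(1 < cs.length ∧ cs.headD ' ' = '0') := by
  intro hh
  rw [decide_eq_true hh.1, hh.2] at h
  simp at h

-- shapes of canonical numerals
theorem pvCanon_cases (cs : List Char) (h : pvCanonL cs = true) :
    (∃ a, cs = [a] ∧ 48 ≤ a.toNat ∧ a.toNat ≤ 57) ∨
    (∃ a b, cs = [a, b] ∧ 49 ≤ a.toNat ∧ a.toNat ≤ 57 ∧ 48 ≤ b.toNat ∧ b.toNat ≤ 57) ∨
    (∃ a b c, cs = [a, b, c] ∧ 49 ≤ a.toNat ∧ a.toNat ≤ 57 ∧ 48 ≤ b.toNat ∧ b.toNat ≤ 57 ∧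
      48 ≤ c.toNat ∧ c.toNat ≤ 57) := by
  unfold pvCanonL at h
  simp only [Bool.and_eq_true] at h
  obtain ⟨⟨⟨hne, hlen⟩, hdig⟩, hlead⟩ := h
  have hlen3 : cs.length ≤ 3 := by simpa using hlen
  have hd : ∀ c ∈ cs, 48 ≤ c.toNat ∧ c.toNat ≤ 57 := by
    intro c hc
    exact pvDigit_bounds c (List.all_eq_true.mp hdig c hc)
  have hnz : 1 < cs.length → cs.headD ' ' ≠ '0' := by
    intro hl h0
    exact pvNotLead cs hlead ⟨hl, h0⟩
  match cs with
  | [] => simp at hne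
  | [a] =>
    exact Or.inl ⟨a, rfl, hd a (by simp)⟩
  | [a, b] =>
    have ha := hd a (by simp)
    have hb := hd b (by simp)
    have h0 : a ≠ '0' := hnz (by simp)
    have h48 : a.toNat ≠ 48 := fun hh => h0 (pvCharEq a '0' (by simpa using hh))
    exact Or.inr (Or.inl ⟨a, b, rfl, by omega, ha.2, hb.1, hb.2⟩)
  | [a, b, c] =>
    have ha := hd a (by simp)
    have hb := hd b (by simp)
    have hc := hd c (by simp)
    have h0 : a ≠ '0' := hnz (by simp)
    have h48 : a.toNat ≠ 48 := fun hh => h0 (pvCharEq a '0' (by simpa using hh))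
    exact Or.inr (Or.inr ⟨a, b, c, rfl, by omega, ha.2, hb.1, hb.2, hc.1, hc.2⟩)
  | a :: b :: c :: d :: rest =>
    refine absurd hlen3 ?_
    simp only [List.length_cons]
    omega

theorem pvVal_one (a : Char) : pvVal [a] 0 = (a.toNat : Int) - 48 := by
  simp [pvVal]

theorem pvVal_two (a b : Char) :
    pvVal [a, b] 0 = 10 * ((a.toNat : Int) - 48) + ((b.toNat : Int) - 48) := by
  simp [pvVal]; try ring

theorem pvVal_three (a b c : Char) :
    pvVal [a, b, c] 0 =
      100 * ((a.toNat : Int) - 48) + 10 * ((b.toNat : Int) - 48) + ((c.toNat : Int) - 48) := by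
  simp [pvVal]; try ring

-- a canonical numeral is determined by its value
theorem pvCanon_inj (cs ds : List Char) (hc : pvCanonL cs = true) (hd : pvCanonL ds = true)
    (hv : pvVal cs 0 = pvVal ds 0) : cs = ds := by
  rcases pvCanon_cases cs hc with ⟨a, rfl, h1⟩ | ⟨a, b, rfl, h1, h2, h3, h4⟩ |
    ⟨a, b, c, rfl, h1, h2, h3, h4, h5, h6⟩ <;>
  rcases pvCanon_cases ds hd with ⟨a', rfl, g1⟩ | ⟨a', b', rfl, g1, g2, g3, g4⟩ |
    ⟨a', b', c', rfl, g1, g2, g3, g4, g5, g6⟩ <;>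
  simp only [pvVal_one, pvVal_two, pvVal_three] at hv
  · have : a.toNat = a'.toNat := by omega
    rw [pvCharEq a a' this]
  · omega
  · omega
  · omega
  · have ha : a.toNat = a'.toNat := by omega
    have hb : b.toNat = b'.toNat := by omega
    rw [pvCharEq a a' ha, pvCharEq b b' hb]
  · omega
  · omega
  · omega
  · have ha : a.toNat = a'.toNat := by omega
    have hb : b.toNat = b'.toNat := by omega
    have hcc : c.toNat = c'.toNat := by omega
    rw [pvCharEq a a' ha, pvCharEq b b' hb, pvCharEq c c' hcc]

theorem pvVal_nonneg (cs : List Char) (h : pvCanonL cs = true) : 0 ≤ pvVal cs 0 := by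
  rcases pvCanon_cases cs h with ⟨a, rfl, h1⟩ | ⟨a, b, rfl, h1, h2, h3, h4⟩ |
    ⟨a, b, c, rfl, h1, h2, h3, h4, h5, h6⟩ <;>
    simp only [pvVal_one, pvVal_two, pvVal_three] <;> omega

-- string lookup becomes integer lookup on canonical keys
theorem pvLookup_to_N (l : List (String × String)) (r : String)
    (hl : l.all (fun p => pvCanonL p.1.toList) = true) (hr : pvCanonL r.toList = true) :
    pvLookup l r = pvNlookup (l.map (fun p => (pvVal p.1.toList 0, p.2))) (pvVal r.toList 0) := by
  induction l with
  | nil => rfl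
  | cons p rest ih =>
    obtain ⟨k, v⟩ := p
    simp only [List.all_cons, Bool.and_eq_true] at hl
    have hkey : (k == r) = (pvVal k.toList 0 == pvVal r.toList 0) := by
      by_cases hkr : k = r
      · subst hkr; simp
      · have hv : pvVal k.toList 0 ≠ pvVal r.toList 0 := by
          intro hv
          exact hkr (String.toList_inj.mp (pvCanon_inj k.toList r.toList hl.1 hr hv))
        simp [hkr, hv]
    simp only [List.map_cons, pvLookup, pvNlookup, hkey]
    by_cases hb : (pvVal k.toList 0 == pvVal r.toList 0) = true
    · simp [hb]
    · simp only [Bool.not_eq_true] at hb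
      simp [hb, ih hl.2]

-- a non-canonical string matches no key
theorem pvLookup_none (l : List (String × String)) (r : String)
    (hl : l.all (fun p => pvCanonL p.1.toList) = true) (hr : pvCanonL r.toList = false) :
    pvLookup l r = none := by
  induction l with
  | nil => rfl
  | cons p rest ih =>
    obtain ⟨k, v⟩ := p
    simp only [List.all_cons, Bool.and_eq_true] at hl
    have hk : ¬((k == r) = true) := by
      intro hh
      have : k = r := by simpa using hh
      rw [this] at hl
      rw [hl.1] at hr
      cases hr
    simp only [pvLookup]
    rw [if_neg hk]
    exact ih hl.2

-- values above 224 match no id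
theorem pvNlookup_none (l : List (Int × String)) (n : Int)
    (hl : l.all (fun p => decide (p.1 ≤ 224)) = true) (hn : 225 ≤ n) : pvNlookup l n = none := by
  induction l with
  | nil => rfl
  | cons p rest ih =>
    obtain ⟨k, v⟩ := p
    simp only [List.all_cons, Bool.and_eq_true, decide_eq_true_eq] at hl
    have hk : ¬((k == n) = true) := by
      intro hh
      have : k = n := by simpa using hh
      omega
    simp only [pvNlookup]
    rw [if_neg hk]
    exact ih hl.2

theorem pvClassify_big (n : Int) (h : 225 ≤ n) : pvClassify n = pvDefault := by
  unfold pvClassify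
  split_ifs <;> first | rfl | omega

-- B's loop returns the accumulated value on digit strings, None otherwise
theorem pvParse_digits (cs : List Char)
    (h : cs.all (fun c => !(decide (c < '0') || decide ('9' < c))) = true) (n : Int) :
    pvParse cs n = some (pvVal cs n) := by
  induction cs generalizing n with
  | nil => rfl
  | cons c rest ih =>
    simp only [List.all_cons, Bool.and_eq_true] at h
    have hcd : ¬(c < '0' ∨ '9' < c) := by
      have := h.1
      simp only [Bool.not_eq_eq_eq_not, Bool.not_true, Bool.or_eq_false_iff,
        decide_eq_false_iff_not, not_lt] at this
      push_neg
      exact ⟨this.1, this.2⟩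
    simp only [pvParse, pvVal]
    rw [if_neg hcd]
    exact ih h.2 _

theorem pvParse_nondigit (cs : List Char)
    (h : cs.all (fun c => !(decide (c < '0') || decide ('9' < c))) = false) (n : Int) :
    pvParse cs n = none := by
  induction cs generalizing n with
  | nil => simp at h
  | cons c rest ih =>
    simp only [List.all_cons, Bool.and_eq_false_iff] at h
    by_cases hcd : c < '0' ∨ '9' < c
    · simp [pvParse, hcd]
    · have hdig : (!(decide (c < '0') || decide ('9' < c))) = true := by
        push_neg at hcd
        simp [hcd.1, hcd.2]
      simp only [pvParse]
      rw [if_neg hcd]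
      rcases h with h | h
      · rw [hdig] at h; cases h
      · exact ih h _

-- B on a non-canonical input returns the default
theorem pvB_noncanon (r : String) (h : pvCanonL r.toList = false) : tagroupa_alt r = pvDefault := by
  have hLT : r.toList.length = r.length := by simp
  have hlenr : PySem.Str.len r = (r.length : Int) := by simp [PySem.Str.len]
  unfold tagroupa_alt
  by_cases h1 : r.length = 0 ∨ 3 < r.length
  · rw [if_pos (by rw [hlenr]; omega)]
  · rw [if_neg (by rw [hlenr]; omega)]
    by_cases h2 : r.toList.all (fun c => !(decide (c < '0') || decide ('9' < c))) = true
    · -- digits, right length: the leading-zero test must be what fails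
      rw [pvParse_digits r.toList h2 0]
      have hne : r.toList ≠ [] := by
        intro hh
        rw [hh] at hLT
        simp at hLT
        omega
      obtain ⟨a, rest, hm⟩ : ∃ a rest, r.toList = a :: rest := by
        cases hmm : r.toList with
        | nil => exact absurd hmm hne
        | cons a rest => exact ⟨a, rest, rfl⟩
      rw [hm] at hLT
      simp only [List.length_cons] at hLT
      have hlead : 1 < r.length ∧ a = '0' := by
        unfold pvCanonL at h
        simp only [Bool.and_eq_false_iff] at h
        rcases h with ((hA | hB) | hC) | hD
        · rw [hm] at hA; simp at hA
        · rw [hm] at hB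
          simp only [decide_eq_false_iff_not, not_le, List.length_cons] at hB
          exfalso; omega
        · rw [h2] at hC; cases hC
        · rw [hm] at hD
          simp only [Bool.not_eq_false', Bool.and_eq_true, decide_eq_true_eq, beq_iff_eq,
            List.headD_cons, List.length_cons] at hD
          exact ⟨by omega, hD.2⟩
      have hget : PySem.Str.pyGet? r 0 = some a := by
        have h0 : PySem.Str.pyGet? r ((0 : Nat) : Int) = r.toList[0]? := PySem.Str.pyGet?_natCast r 0
        rw [hm] at h0
        simpa using h0
      show (if 1 < PySem.Str.len r ∧ (PySem.Str.pyGet? r 0 == some '0') = true then pvDefault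
            else pvClassify (pvVal r.toList 0)) = pvDefault
      rw [if_pos ⟨by rw [hlenr]; exact_mod_cast hlead.1, by rw [hget, hlead.2]; simp⟩]
    · -- a non-digit character: the loop returns the default
      rw [pvParse_nondigit r.toList (by simpa using h2) 0]

-- B on a canonical input computes _label_for of its value
theorem pvB_canon (r : String) (h : pvCanonL r.toList = true) :
    tagroupa_alt r = pvClassify (pvVal r.toList 0) := by
  have hLT : r.toList.length = r.length := by simp
  have hlenr : PySem.Str.len r = (r.length : Int) := by simp [PySem.Str.len]
  unfold tagroupa_alt
  unfold pvCanonL at h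
  simp only [Bool.and_eq_true] at h
  obtain ⟨⟨⟨hne, hlen⟩, hdig⟩, hlead⟩ := h
  have hne' : r.toList ≠ [] := by simpa using hne
  have hlen3 : r.toList.length ≤ 3 := by simpa using hlen
  have hlen1 : 0 < r.toList.length := List.length_pos_iff.mpr hne'
  rw [hLT] at hlen3 hlen1
  rw [if_neg (by rw [hlenr]; omega)]
  rw [pvParse_digits r.toList hdig 0]
  show (if 1 < PySem.Str.len r ∧ (PySem.Str.pyGet? r 0 == some '0') = true then pvDefault
        else pvClassify (pvVal r.toList 0)) = pvClassify (pvVal r.toList 0)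
  rw [if_neg ?hz]
  case hz =>
    intro hh
    obtain ⟨a, rest, hm⟩ : ∃ a rest, r.toList = a :: rest := by
      cases hmm : r.toList with
      | nil => exact absurd hmm hne'
      | cons a rest => exact ⟨a, rest, rfl⟩
    have hget : PySem.Str.pyGet? r 0 = some a := by
      have h0 : PySem.Str.pyGet? r ((0 : Nat) : Int) = r.toList[0]? := PySem.Str.pyGet?_natCast r 0
      rw [hm] at h0
      simpa using h0
    have ha0 : a = '0' := by
      have := hh.2
      rw [hget] at this
      simpa using this
    have hl1 : 1 < r.toList.length := by
      have := hh.1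
      rw [hlenr] at this
      rw [hLT]
      exact_mod_cast this
    exact pvNotLead r.toList hlead ⟨hl1, by rw [hm]; simp [ha0]⟩

-- the 225 catalogued values, checked in chunks
set_option maxRecDepth 40000 in
theorem pvEnum0 : (List.range' 0 45).all
    (fun m => (pvNlookup pvN (m : Int)).getD pvDefault == pvClassify (m : Int)) = true := by decide
set_option maxRecDepth 40000 in
theorem pvEnum1 : (List.range' 45 45).all
    (fun m => (pvNlookup pvN (m : Int)).getD pvDefault == pvClassify (m : Int)) = true := by decide
set_option maxRecDepth 40000 in
theorem pvEnum2 : (List.range' 90 45).all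
    (fun m => (pvNlookup pvN (m : Int)).getD pvDefault == pvClassify (m : Int)) = true := by decide
set_option maxRecDepth 40000 in
theorem pvEnum3 : (List.range' 135 45).all
    (fun m => (pvNlookup pvN (m : Int)).getD pvDefault == pvClassify (m : Int)) = true := by decide
set_option maxRecDepth 40000 in
theorem pvEnum4 : (List.range' 180 45).all
    (fun m => (pvNlookup pvN (m : Int)).getD pvDefault == pvClassify (m : Int)) = true := by decide

theorem pvEnumAll (m : Nat) (hm : m < 225) :
    (pvNlookup pvN (m : Int)).getD pvDefault = pvClassify (m : Int) := by
  have mem : ∀ (s : Nat), s ≤ m → m < s + 45 → m ∈ List.range' s 45 := by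
    intro s h1 h2
    rw [List.mem_range']
    exact ⟨m - s, by omega, by omega⟩
  have get : ∀ (l : List Nat), l.all
      (fun m => (pvNlookup pvN (m : Int)).getD pvDefault == pvClassify (m : Int)) = true →
      m ∈ l → (pvNlookup pvN (m : Int)).getD pvDefault = pvClassify (m : Int) := by
    intro l hl hml
    have := List.all_eq_true.mp hl m hml
    simpa using this
  rcases Nat.lt_or_ge m 45 with h | h
  · exact get _ pvEnum0 (mem 0 (by omega) (by omega))
  rcases Nat.lt_or_ge m 90 with h2 | h2
  · exact get _ pvEnum1 (mem 45 (by omega) (by omega))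
  rcases Nat.lt_or_ge m 135 with h3 | h3
  · exact get _ pvEnum2 (mem 90 (by omega) (by omega))
  rcases Nat.lt_or_ge m 180 with h4 | h4
  · exact get _ pvEnum3 (mem 135 (by omega) (by omega))
  · exact get _ pvEnum4 (mem 180 (by omega) (by omega))

-- ===== VERDICT (by name: the statement is the Claim_ definition above) =====
theorem tagroupa_spec : Claim_equal_tagroupa := by
  intro r _
  unfold Spec_tagroupa
  rw [pvA_eq, pvL_eq]
  by_cases hc : pvCanonL r.toList = true
  · rw [pvLookup_to_N pvLc r pvKeysCanon hc, pvMap_eq, pvB_canon r hc]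
    set n := pvVal r.toList 0 with hn
    have hpos : 0 ≤ n := pvVal_nonneg r.toList hc
    rcases Int.lt_or_le n 225 with hlt | hge
    · have hcast : ((n.toNat : Nat) : Int) = n := Int.toNat_of_nonneg hpos
      have hm : n.toNat < 225 := by omega
      rw [← hcast]
      exact pvEnumAll n.toNat hm
    · rw [pvNlookup_none pvN n pvN_small hge, pvClassify_big n hge]
      rfl
  · have hc' : pvCanonL r.toList = false := by simpa using hc
    rw [pvLookup_none pvLc r pvKeysCanon hc', pvB_noncanon r hc']
    rfl
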